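-- pv_equiv track=rewrite | github.com/tompkinsguitar/AlfabetoCode | Alfabeto/atonal_tools.py | prime_form
-- ===== SOURCE A (Python) =====
-- def prime_form(pitches):
--     """Returns prime form after attempting all inversions and transpositions of set"""
--     pc_set = sorted(set([pitch % 12 for pitch in pitches]))
--     all_permutations = []
--
--     def inversions(pcset, index):
--         i_pitches = [(index - pc) % 12 for pc in pcset]
--         return i_pitches
--
--     def transpositions(pcset, index):
--         t_pitches = [(index + pc) % 12 for pc in pcset]
--         return t_pitches
--
--     for x in range(12):
--         all_permutations.append(sorted(inversions(pc_set, x)))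
--         all_permutations.append(sorted(transpositions(pc_set, x)))
--
--     return min(all_permutations)
-- ===== SOURCE B (Python) =====
-- def prime_form(pitches):
--     """Prime form via member-driven rotate-to-zero over the set and its inversion."""
--     pcs = sorted({p % 12 for p in pitches})
--     if not pcs:
--         return []
--     inv = sorted({(-p) % 12 for p in pcs})
--     candidates = [sorted((q - e) % 12 for q in orient)
--                   for orient in (pcs, inv) for e in orient]
--     return min(candidates)
-- ===== Notes on version B (the rewrite author's own statement) =====
-- stated objective: alternative
-- what changed: B drops A's fixed 24-candidate transpose/invert enumeration over all 12 offsets and instead rotates each orientation (the pc-set and its inversion) to zero at each of its own members, taking the min of those at-most-2n candidates.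
import Mathlib
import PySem

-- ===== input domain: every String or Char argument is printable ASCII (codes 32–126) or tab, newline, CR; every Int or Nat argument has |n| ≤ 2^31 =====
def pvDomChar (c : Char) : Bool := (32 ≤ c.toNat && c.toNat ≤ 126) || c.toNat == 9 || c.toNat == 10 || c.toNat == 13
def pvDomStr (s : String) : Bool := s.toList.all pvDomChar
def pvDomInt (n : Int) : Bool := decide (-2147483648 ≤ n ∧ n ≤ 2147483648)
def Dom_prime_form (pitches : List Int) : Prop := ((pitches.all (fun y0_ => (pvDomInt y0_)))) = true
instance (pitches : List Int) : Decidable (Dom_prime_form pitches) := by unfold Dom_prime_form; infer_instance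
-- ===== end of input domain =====

-- B replaces A's fixed 24-candidate transpose/invert enumeration by member-driven rotate-to-zero
-- candidates over the pc-set and its inversion (objective: alternative decomposition, same result).

-- ===== PORT A =====
-- A's inner helper 'inversions'
def pfInversions (pcset : List Int) (index : Int) : List Int :=
  pcset.map (fun pc => PySem.Int.mod (index - pc) 12)

-- A's inner helper 'transpositions'
def pfTranspositions (pcset : List Int) (index : Int) : List Int :=
  pcset.map (fun pc => PySem.Int.mod (index + pc) 12)

def prime_form (pitches : List Int) : List Int :=
  let pc_set := PySem.List.sorted (PySem.Set.ofList (pitches.map (fun p => PySem.Int.mod p 12))) (fun y => y) false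
  let all_permutations := (PySem.List.pyRange 0 12 1).foldl
    (fun acc x => (acc ++ [PySem.List.sorted (pfInversions pc_set x) (fun y => y) false])
                       ++ [PySem.List.sorted (pfTranspositions pc_set x) (fun y => y) false]) []
  -- min(all_permutations): the list always has 24 elements, so the 'getD []' default is never taken
  (PySem.List.min? all_permutations (fun y => y)).getD []

-- ===== PORT B =====
def prime_form_alt (pitches : List Int) : List Int :=
  let pcs := PySem.List.sorted (PySem.Set.ofList (pitches.map (fun p => PySem.Int.mod p 12))) (fun y => y) false
  if pcs = [] then []
  else
    let inv := PySem.List.sorted (PySem.Set.ofList (pcs.map (fun p => PySem.Int.mod (-p) 12))) (fun y => y) false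
    let candidates := [pcs, inv].flatMap (fun orient =>
      orient.map (fun e => PySem.List.sorted (orient.map (fun q => PySem.Int.mod (q - e) 12)) (fun y => y) false))
    -- min(candidates): candidates is nonempty here, so the 'getD []' default is never taken
    (PySem.List.min? candidates (fun y => y)).getD []

-- ===== PRECONDITION & SPEC =====
def Spec_prime_form (pitches : List Int) (out : List Int) : Prop := out = prime_form_alt pitches
instance (pitches : List Int) (out : List Int) : Decidable (Spec_prime_form pitches out) := by unfold Spec_prime_form; infer_instance

-- ===== CLAIM (what is proved, stated in full; the proofs are below) =====
def Claim_equal_prime_form : Prop := ∀ (pitches : List Int), Dom_prime_form pitches → Spec_prime_form pitches (prime_form pitches)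

-- ===== LEMMAS AND PROOFS =====

-- the shared first line of both programs: sorted({p % 12 for p in pitches})
def pcSetOf (pitches : List Int) : List Int :=
  PySem.List.sorted (PySem.Set.ofList (pitches.map (fun p => PySem.Int.mod p 12))) (fun y => y) false

def sInv (s : List Int) (x : Int) : List Int := PySem.List.sorted (pfInversions s x) (fun y => y) false
def sTr (s : List Int) (x : Int) : List Int := PySem.List.sorted (pfTranspositions s x) (fun y => y) false
def rotC (o : List Int) (e : Int) : List Int :=
  PySem.List.sorted (o.map (fun q => PySem.Int.mod (q - e) 12)) (fun y => y) false
def invOf (s : List Int) : List Int :=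
  PySem.List.sorted (PySem.Set.ofList (s.map (fun p => PySem.Int.mod (-p) 12))) (fun y => y) false
def permsOf (s : List Int) : List (List Int) :=
  (PySem.List.pyRange 0 12 1).flatMap (fun x => [sInv s x, sTr s x])
def candsOf (s : List Int) : List (List Int) := [s, invOf s].flatMap (fun o => o.map (rotC o))

def aCore (s : List Int) : List Int := (PySem.List.min? (permsOf s) (fun y => y)).getD []
def bCore (s : List Int) : List Int :=
  if s = [] then [] else (PySem.List.min? (candsOf s) (fun y => y)).getD []

theorem A_factor (l : List Int) : prime_form l = aCore (pcSetOf l) := by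
  show (PySem.List.min? ((PySem.List.pyRange 0 12 1).foldl
        (fun acc x => (acc ++ [sInv (pcSetOf l) x]) ++ [sTr (pcSetOf l) x]) []) (fun y => y)).getD []
      = aCore (pcSetOf l)
  rw [show (fun (acc : List (List Int)) (x : Int) => (acc ++ [sInv (pcSetOf l) x]) ++ [sTr (pcSetOf l) x])
      = fun acc x => acc ++ [sInv (pcSetOf l) x, sTr (pcSetOf l) x] from
    funext fun acc => funext fun x => by simp]
  rw [PySem.List.foldl_append_eq_flatMap]
  rfl

theorem B_factor (l : List Int) : prime_form_alt l = bCore (pcSetOf l) := rfl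

-- instance bridge: the min? the ports elaborate equals the one the order lemmas speak about
theorem min?_inst (L : List (List Int)) :
    PySem.List.min? L (fun y => y) = @PySem.List.min? (List Int) (List Int)
      (@Preorder.toLT _ (@PartialOrder.toPreorder _ (@LinearOrder.toPartialOrder _ (@List.instLinearOrder Int _))))
      (@LinearOrder.toDecidableLT _ (@List.instLinearOrder Int _)) L (fun y => y) := by
  congr 1

theorem minIsMin {L : List (List Int)} {m : List Int}
    (h : PySem.List.min? L (fun y => y) = some m) : ∀ y ∈ L, m ≤ y := by
  rw [min?_inst] at h
  exact PySem.List.min?_isMin h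

theorem minUnique {L : List (List Int)} {m m1 : List Int}
    (h : PySem.List.min? L (fun y => y) = some m)
    (h1 : m1 ∈ L) (hmin : ∀ y ∈ L, m1 ≤ y) : m = m1 :=
  le_antisymm (minIsMin h m1 h1) (hmin m (PySem.List.min?_mem h))

theorem pmod (a : Int) : PySem.Int.mod a 12 = a % 12 :=
  PySem.Int.mod_eq_emod_of_pos (by norm_num)

theorem ofList_nil_iff (xs : List Int) : PySem.Set.ofList xs = [] ↔ xs = [] := by
  constructor
  · intro h
    rcases xs with _ | ⟨a, t⟩
    · rfl
    · exact absurd ((PySem.Set.mem_ofList (a :: t) a).mpr List.mem_cons_self) (by simp [h])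
  · rintro rfl; rfl

theorem mem_perms {s y : List Int} :
    y ∈ permsOf s ↔ ∃ x : Int, 0 ≤ x ∧ x < 12 ∧ (y = sInv s x ∨ y = sTr s x) := by
  simp only [permsOf, List.mem_flatMap, PySem.List.mem_pyRange_one, List.mem_cons,
    List.not_mem_nil, or_false]
  constructor
  · rintro ⟨x, ⟨hx0, hx12⟩, h⟩; exact ⟨x, hx0, hx12, h⟩
  · rintro ⟨x, hx0, hx12, h⟩; exact ⟨x, ⟨hx0, hx12⟩, h⟩

theorem mem_cands {s c : List Int} :
    c ∈ candsOf s ↔ (∃ e ∈ s, c = rotC s e) ∨ (∃ e ∈ invOf s, c = rotC (invOf s) e) := by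
  simp only [candsOf, List.mem_flatMap, List.mem_cons, List.not_mem_nil, or_false, List.mem_map]
  constructor
  · rintro ⟨o, (rfl | rfl), e, he, rfl⟩
    · exact Or.inl ⟨e, he, rfl⟩
    · exact Or.inr ⟨e, he, rfl⟩
  · rintro (⟨e, he, rfl⟩ | ⟨e, he, rfl⟩)
    · exact ⟨s, Or.inl rfl, e, he, rfl⟩
    · exact ⟨invOf s, Or.inr rfl, e, he, rfl⟩

-- rotate-to-zero over s is one of A's transpositions
theorem rot_eq_sTr (s : List Int) (e : Int) : rotC s e = sTr s (PySem.Int.mod (-e) 12) := by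
  unfold rotC sTr pfTranspositions
  congr 1
  exact List.map_congr_left fun q _ => by rw [pmod, pmod, pmod]; omega

-- invOf s is a permutation of the pointwise inversion of s
theorem invOf_perm {s : List Int} (hnd : s.Nodup) (hb : ∀ p ∈ s, 0 ≤ p ∧ p < 12) :
    (invOf s).Perm (s.map (fun p => PySem.Int.mod (-p) 12)) := by
  apply (PySem.List.sorted_perm _ _ _).trans
  have hmap : (s.map (fun p => PySem.Int.mod (-p) 12)).Nodup := by
    refine List.Nodup.map_on ?_ hnd
    intro p hp q hq hpq
    have h1 := hb p hp; have h2 := hb q hq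
    rw [pmod, pmod] at hpq; omega
  refine (List.perm_ext_iff_of_nodup (PySem.Set.nodup_ofList _) hmap).mpr ?_
  intro a; rw [PySem.Set.mem_ofList]

-- rotate-to-zero over the inversion is one of A's inversions
theorem rot_inv_eq_sInv {s : List Int} (hnd : s.Nodup) (hb : ∀ p ∈ s, 0 ≤ p ∧ p < 12) (e : Int) :
    rotC (invOf s) e = sInv s (PySem.Int.mod (-e) 12) := by
  unfold rotC sInv pfInversions
  rw [PySem.List.sorted_eq_sorted_of_perm _
        (s.map (fun p => PySem.Int.mod (PySem.Int.mod (-p) 12 - e) 12)) (fun y => y)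
        (fun a b h => h) (((invOf_perm hnd hb).map _).trans (by rw [List.map_map]; rfl))]
  congr 1
  exact List.map_congr_left fun p _ => by rw [pmod, pmod, pmod, pmod]; omega

-- every candidate of B starts with 0
theorem cand_head {o : List Int} {e : Int} (ho : o ≠ []) (he : e ∈ o) :
    ∃ t, rotC o e = 0 :: t := by
  have hne : (o.map (fun q => PySem.Int.mod (q - e) 12)) ≠ [] := by simpa using ho
  rcases hm : rotC o e with _ | ⟨m, t⟩
  · exact absurd ((PySem.List.sorted_eq_nil_iff _ _ _).mp hm) hne
  · have hmem : m ∈ o.map (fun q => PySem.Int.mod (q - e) 12) := by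
      rw [← PySem.List.mem_sorted (key := fun y => y) (rev := false)]
      rw [show PySem.List.sorted (o.map (fun q => PySem.Int.mod (q - e) 12)) (fun y => y) false
            = m :: t from hm]
      exact List.mem_cons_self
    have h0mem : (0 : Int) ∈ o.map (fun q => PySem.Int.mod (q - e) 12) :=
      List.mem_map.mpr ⟨e, he, by rw [pmod]; omega⟩
    have hle : m ≤ 0 := PySem.List.key_head_sorted_le _ (fun y => y) hm 0 h0mem
    have hm0 : m = 0 := by
      rcases List.mem_map.mp hmem with ⟨q, _, rfl⟩
      rw [pmod] at *; omega
    exact ⟨t, by rw [hm0]⟩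

-- a sort of an all-≥1 nonempty list dominates any list starting with 0
theorem zero_cons_le (X : List Int) {t y : List Int}
    (hy : PySem.List.sorted X (fun y => y) false = y) (hX : X ≠ [])
    (hpos : ∀ v ∈ X, 1 ≤ v) : (0 :: t) ≤ y := by
  rcases hY : y with _ | ⟨h, t2⟩
  · exact absurd ((PySem.List.sorted_eq_nil_iff _ _ _).mp (hY ▸ hy)) hX
  · have hmem : h ∈ X := by
      rw [← PySem.List.mem_sorted (key := fun y => y) (rev := false), hy, hY]
      exact List.mem_cons_self
    exact le_of_lt (List.Lex.rel (by have := hpos h hmem; omega))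

theorem core (s : List Int) (hne : s ≠ []) (hnd : s.Nodup) (hb : ∀ p ∈ s, 0 ≤ p ∧ p < 12) :
    aCore s = bCore s := by
  rw [bCore, if_neg hne]
  have hinv_ne : invOf s ≠ [] := by
    rw [invOf, Ne, PySem.List.sorted_eq_nil_iff, ofList_nil_iff]
    simpa using hne
  obtain ⟨e0, he0⟩ : ∃ e, e ∈ s := by
    rcases s with _ | ⟨a, t⟩
    · exact absurd rfl hne
    · exact ⟨a, List.mem_cons_self⟩
  have hcand_ne : candsOf s ≠ [] := fun h => by
    have hm : rotC s e0 ∈ candsOf s := mem_cands.mpr (Or.inl ⟨e0, he0, rfl⟩)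
    rw [h] at hm; exact List.not_mem_nil hm
  have hperm_ne : permsOf s ≠ [] := fun h => by
    have hm : sTr s 0 ∈ permsOf s := mem_perms.mpr ⟨0, le_refl 0, by norm_num, Or.inr rfl⟩
    rw [h] at hm; exact List.not_mem_nil hm
  obtain ⟨m0, hm0⟩ : ∃ m0, PySem.List.min? (candsOf s) (fun y => y) = some m0 := by
    rcases h : PySem.List.min? (candsOf s) (fun y => y) with _ | m0
    · exact absurd ((PySem.List.min?_eq_none_iff _ _).mp h) hcand_ne
    · exact ⟨m0, rfl⟩
  obtain ⟨mA, hmA⟩ : ∃ mA, PySem.List.min? (permsOf s) (fun y => y) = some mA := by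
    rcases h : PySem.List.min? (permsOf s) (fun y => y) with _ | mA
    · exact absurd ((PySem.List.min?_eq_none_iff _ _).mp h) hperm_ne
    · exact ⟨mA, rfl⟩
  rw [aCore, hmA, hm0, Option.getD_some, Option.getD_some]
  -- m0 starts with 0
  obtain ⟨t0, ht0⟩ : ∃ t, m0 = 0 :: t := by
    rcases mem_cands.mp (PySem.List.min?_mem hm0) with ⟨e, he, rfl⟩ | ⟨e, he, rfl⟩
    · exact cand_head hne he
    · exact cand_head hinv_ne he
  refine minUnique hmA ?_ ?_
  · -- m0 is one of A's candidates
    rcases mem_cands.mp (PySem.List.min?_mem hm0) with ⟨e, he, rfl⟩ | ⟨e, he, rfl⟩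
    · rw [rot_eq_sTr]
      exact mem_perms.mpr ⟨_, PySem.Int.mod_nonneg _ (by norm_num),
        PySem.Int.mod_lt _ (by norm_num), Or.inr rfl⟩
    · rw [rot_inv_eq_sInv hnd hb]
      exact mem_perms.mpr ⟨_, PySem.Int.mod_nonneg _ (by norm_num),
        PySem.Int.mod_lt _ (by norm_num), Or.inl rfl⟩
  · -- m0 dominates every one of A's 24 candidates
    intro y hy
    rcases mem_perms.mp hy with ⟨x, _, _, (rfl | rfl)⟩
    · -- y = sInv s x
      by_cases h0 : ∃ p ∈ s, PySem.Int.mod (x - p) 12 = 0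
      · obtain ⟨p, hp, hxp⟩ := h0
        rw [pmod] at hxp
        have heq : sInv s x = rotC (invOf s) (PySem.Int.mod (-x) 12) := by
          rw [rot_inv_eq_sInv hnd hb]
          unfold sInv pfInversions
          congr 1
          exact List.map_congr_left fun q _ => by rw [pmod, pmod, pmod, pmod]; omega
        have hmemc : PySem.Int.mod (-x) 12 ∈ invOf s := by
          rw [invOf, PySem.List.mem_sorted, PySem.Set.mem_ofList]
          exact List.mem_map.mpr ⟨p, hp, by rw [pmod, pmod]; omega⟩
        rw [heq]
        exact minIsMin hm0 _ (mem_cands.mpr (Or.inr ⟨_, hmemc, rfl⟩))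
      · rw [ht0]
        refine zero_cons_le (pfInversions s x) rfl (by simpa [pfInversions] using hne) ?_
        intro v hv
        rcases List.mem_map.mp hv with ⟨p, hp, rfl⟩
        have hnz : ¬ PySem.Int.mod (x - p) 12 = 0 := fun hc => h0 ⟨p, hp, hc⟩
        rw [pmod] at *; omega
    · -- y = sTr s x
      by_cases h0 : ∃ p ∈ s, PySem.Int.mod (x + p) 12 = 0
      · obtain ⟨p, hp, hxp⟩ := h0
        rw [pmod] at hxp
        have heq : sTr s x = rotC s p := by
          rw [rot_eq_sTr]
          unfold sTr pfTranspositions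
          congr 1
          exact List.map_congr_left fun q _ => by rw [pmod, pmod, pmod]; omega
        rw [heq]
        exact minIsMin hm0 _ (mem_cands.mpr (Or.inl ⟨p, hp, rfl⟩))
      · rw [ht0]
        refine zero_cons_le (pfTranspositions s x) rfl (by simpa [pfTranspositions] using hne) ?_
        intro v hv
        rcases List.mem_map.mp hv with ⟨p, hp, rfl⟩
        have hnz : ¬ PySem.Int.mod (x + p) 12 = 0 := fun hc => h0 ⟨p, hp, hc⟩
        rw [pmod] at *; omega

theorem pcSet_nodup (l : List Int) : (pcSetOf l).Nodup :=
  ((PySem.List.sorted_perm _ _ _).nodup_iff).mpr (PySem.Set.nodup_ofList _)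

theorem pcSet_bounds (l : List Int) : ∀ p ∈ pcSetOf l, 0 ≤ p ∧ p < 12 := by
  intro p hp
  rw [pcSetOf, PySem.List.mem_sorted, PySem.Set.mem_ofList] at hp
  rcases List.mem_map.mp hp with ⟨q, _, rfl⟩
  exact ⟨PySem.Int.mod_nonneg q (by norm_num), PySem.Int.mod_lt q (by norm_num)⟩

-- ===== VERDICT (by name: the statement is the Claim_ definition above) =====
theorem prime_form_spec : Claim_equal_prime_form := by
  intro l _
  show prime_form l = prime_form_alt l
  by_cases hl : l = []
  · subst hl; decide
  · rw [A_factor, B_factor]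
    refine core _ ?_ (pcSet_nodup l) (pcSet_bounds l)
    rw [pcSetOf, Ne, PySem.List.sorted_eq_nil_iff, ofList_nil_iff]
    simpa using hl
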